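-- pv_equiv track=rewrite | github.com/pranavkalal/AI-Knowledge-Hub | scripts/query_faiss.py | stitch_preview
-- ===== SOURCE A (Python) =====
-- def neighbor_ids(cid: str, neighbors: int) -> list[str]:
--     """Return list of neighbor chunk ids ±N around cid (expects suffix `_chunkNNNN`)."""
--     if neighbors <= 0:
--         return [cid]
--     base, _, tail = cid.partition("_chunk")
--     try:
--         idx = int(tail)
--     except ValueError:
--         return [cid]
--     ids = []
--     for j in range(idx - neighbors, idx + neighbors + 1):
--         ids.append(f"{base}_chunk{j:04d}")
--     return ids
--
-- def stitch_preview(center_rec, lookup, neighbors=1, max_chars=1800, no_truncate=False) -> str: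
--     """
--     Stitch ±neighbors chunks from the same doc to form a readable preview.
--     Honors max_chars unless no_truncate=True.
--     """
--     cid = center_rec.get("id", "")
--     center_doc = center_rec.get("doc_id") or cid.split("_chunk")[0]
--     parts = []
--     total_len = 0
--
--     for nid in neighbor_ids(cid, neighbors):
--         rec = lookup.get(nid)
--         if rec and (rec.get("doc_id") or nid.split("_chunk")[0]) == center_doc:
--             txt = (rec.get("text") or "").replace("\n", " ")
--             if not txt:
--                 continue
--             if no_truncate:
--                 parts.append(txt)
--                 continue
--             room = max_chars - total_len
--             if room <= 0:
--                 break
--             if len(txt) <= room: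
--                 parts.append(txt)
--                 total_len += len(txt)
--             else:
--                 parts.append(txt[:room])
--                 total_len += room
--                 break
--
--     joined = " ".join(parts) if parts else (center_rec.get("text") or "")
--     return joined if no_truncate else joined[:max_chars]
-- ===== SOURCE B (Python) =====
-- def neighbor_ids(cid: str, neighbors: int) -> list[str]:
--     """Return list of neighbor chunk ids ±N around cid (expects suffix `_chunkNNNN`)."""
--     if neighbors <= 0:
--         return [cid]
--     base, _, tail = cid.partition("_chunk")
--     try:
--         idx = int(tail)
--     except ValueError:
--         return [cid]
--     return [f"{base}_chunk{j:04d}" for j in range(idx - neighbors, idx + neighbors + 1)]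
--
-- def stitch_preview(center_rec, lookup, neighbors=1, max_chars=1800, no_truncate=False) -> str:
--     """Stitch ±neighbors chunks from the same doc; single final truncation, no running budget."""
--     cid = center_rec.get("id", "")
--     center_doc = center_rec.get("doc_id") or cid.split("_chunk")[0]
--     texts = []
--     for nid in neighbor_ids(cid, neighbors):
--         rec = lookup.get(nid)
--         if rec and (rec.get("doc_id") or nid.split("_chunk")[0]) == center_doc:
--             txt = (rec.get("text") or "").replace("\n", " ")
--             if txt:
--                 texts.append(txt)
--     joined = " ".join(texts) if texts else (center_rec.get("text") or "")
--     return joined if no_truncate else joined[:max_chars]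
-- ===== Notes on version B (the rewrite author's own statement) =====
-- stated objective: simpler
-- what changed: B removes A's running character budget, per-part room computation and early break: it collects every qualifying neighbor text in one pass (existing record, truthy, same doc, nonempty newline-replaced text) and applies one final joined[:max_chars] slice, which reproduces A's per-part budgeting exactly.
import Mathlib
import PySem

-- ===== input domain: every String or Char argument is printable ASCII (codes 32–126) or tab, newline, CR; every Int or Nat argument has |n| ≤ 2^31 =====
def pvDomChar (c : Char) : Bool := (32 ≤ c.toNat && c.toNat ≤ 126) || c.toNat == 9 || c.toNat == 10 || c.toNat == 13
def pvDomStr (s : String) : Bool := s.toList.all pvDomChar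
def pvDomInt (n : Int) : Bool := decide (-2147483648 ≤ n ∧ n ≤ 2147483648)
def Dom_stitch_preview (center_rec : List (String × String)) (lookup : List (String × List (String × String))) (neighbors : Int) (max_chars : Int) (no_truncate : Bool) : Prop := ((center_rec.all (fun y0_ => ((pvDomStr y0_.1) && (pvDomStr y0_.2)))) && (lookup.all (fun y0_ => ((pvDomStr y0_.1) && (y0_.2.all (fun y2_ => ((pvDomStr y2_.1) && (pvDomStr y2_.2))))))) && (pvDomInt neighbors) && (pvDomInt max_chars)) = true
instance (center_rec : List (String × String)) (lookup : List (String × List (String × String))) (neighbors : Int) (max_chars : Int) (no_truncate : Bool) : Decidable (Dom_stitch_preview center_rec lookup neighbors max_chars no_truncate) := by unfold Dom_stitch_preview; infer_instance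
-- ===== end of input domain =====

-- B drops A's running character budget and early break: it collects every qualifying neighbor
-- text in one pass and applies a single final [:max_chars] slice (objective: simpler).

-- ===== PORT A =====
-- helper `neighbor_ids` (same module, used verbatim by both Pythons).
-- `cid.partition("_chunk")` is ported by hand via PySem.Chars.find: first occurrence;
-- no occurrence gives (cid, "", "") i.e. tail = "" (exact CPython behaviour).
def pvNeighborIds (cid : String) (neighbors : Int) : List String :=
  if neighbors ≤ 0 then [cid]
  else
    let cs := cid.toList
    let sub := "_chunk".toList
    let f := PySem.Chars.find cs sub
    let base := if f = -1 then cs else cs.take f.toNat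
    let tail := if f = -1 then ([] : List Char) else cs.drop (f.toNat + sub.length)
    match PySem.Int.ofChars? tail with
    | none => [cid]
    | some idx =>
      (PySem.List.pyRange (idx - neighbors) (idx + neighbors + 1) 1).map
        (fun j => String.ofList (base ++ sub ++ PySem.Chars.zfill (PySem.Int.toChars j) 4))

-- `rec.get("doc_id") or sid.split("_chunk")[0]` — the same subexpression in both Pythons.
-- split? is some because the separator is nonempty; the split is never empty, headD is exact.
def pvDocIdOr (r : PySem.Dict String String) (sid : String) : String :=
  let d := (PySem.Dict.get? r "doc_id").getD ""
  if d ≠ "" then d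
  else ((PySem.Str.split? sid "_chunk").getD []).headD ""

-- `(rec.get("text") or "").replace("\n", " ")` — the same subexpression in both Pythons.
def pvText (r : PySem.Dict String String) : String :=
  PySem.Str.replace ((PySem.Dict.get? r "text").getD "") "\n" " "

-- A's for-loop: parts / total_len accumulators, `continue`s, and the `break`s (which
-- return the accumulated parts directly).
def pvLoopA (lookup : PySem.Dict String (List (String × String))) (cdoc : String)
    (nt : Bool) (mc : Int) : List String → List String → Int → List String
  | [], parts, _ => parts
  | nid :: rest, parts, total =>
    match PySem.Dict.get? lookup nid with
    | none => pvLoopA lookup cdoc nt mc rest parts total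
    | some r =>
      if r ≠ [] ∧ pvDocIdOr ⟨r⟩ nid = cdoc then
        let txt := pvText ⟨r⟩
        if txt = "" then pvLoopA lookup cdoc nt mc rest parts total
        else if nt then pvLoopA lookup cdoc nt mc rest (parts ++ [txt]) total
        else
          let room := mc - total
          if room ≤ 0 then parts
          else if PySem.Str.len txt ≤ room then
            pvLoopA lookup cdoc nt mc rest (parts ++ [txt]) (total + PySem.Str.len txt)
          else parts ++ [PySem.Str.slice txt none (some room)]
      else pvLoopA lookup cdoc nt mc rest parts total

def stitch_preview (center_rec : List (String × String)) (lookup : List (String × List (String × String))) (neighbors : Int) (max_chars : Int) (no_truncate : Bool) : String :=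
  let cid := PySem.Dict.getD ⟨center_rec⟩ "id" ""
  let center_doc := pvDocIdOr ⟨center_rec⟩ cid
  let parts := pvLoopA ⟨lookup⟩ center_doc no_truncate max_chars (pvNeighborIds cid neighbors) [] 0
  let joined := if parts ≠ [] then PySem.Str.join " " parts
                else (PySem.Dict.get? ⟨center_rec⟩ "text").getD ""
  if no_truncate then joined else PySem.Str.slice joined none (some max_chars)

-- ===== PORT B =====
-- B's per-id qualification test: the record exists, is truthy, belongs to center_doc,
-- and its newline-replaced text is nonempty.
def pvChunkText? (lookup : PySem.Dict String (List (String × String))) (cdoc : String)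
    (nid : String) : Option String :=
  match PySem.Dict.get? lookup nid with
  | none => none
  | some r =>
    if r ≠ [] ∧ pvDocIdOr ⟨r⟩ nid = cdoc then
      let txt := pvText ⟨r⟩
      if txt ≠ "" then some txt else none
    else none

def stitch_preview_alt (center_rec : List (String × String)) (lookup : List (String × List (String × String))) (neighbors : Int) (max_chars : Int) (no_truncate : Bool) : String :=
  let cid := PySem.Dict.getD ⟨center_rec⟩ "id" ""
  let center_doc := pvDocIdOr ⟨center_rec⟩ cid
  let texts := (pvNeighborIds cid neighbors).filterMap (pvChunkText? ⟨lookup⟩ center_doc)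
  let joined := if texts.isEmpty then (PySem.Dict.get? ⟨center_rec⟩ "text").getD ""
                else PySem.Str.join " " texts
  if no_truncate then joined else PySem.Str.slice joined none (some max_chars)

-- ===== PRECONDITION & SPEC =====
-- Pre_ excludes a negative max_chars when truncation is on: a negative character budget is
-- outside the function's natural domain, and there Python's negative-slice wraparound makes
-- both programs return accidental values (A the center text trimmed from the end, B the
-- stitched text trimmed from the end).
def Pre_stitch_preview (center_rec : List (String × String)) (lookup : List (String × List (String × String))) (neighbors : Int) (max_chars : Int) (no_truncate : Bool) : Prop :=
  no_truncate = true ∨ 0 ≤ max_chars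
instance (center_rec : List (String × String)) (lookup : List (String × List (String × String))) (neighbors : Int) (max_chars : Int) (no_truncate : Bool) : Decidable (Pre_stitch_preview center_rec lookup neighbors max_chars no_truncate) := by unfold Pre_stitch_preview; infer_instance

def pvWitness_stitch_preview : (List (String × String)) × (List (String × List (String × String))) × Int × Int × Bool :=
  ([("id", "d_chunk0001"), ("text", "center")], [("d_chunk0001", [("text", "hello")])], 1, 1800, false)

def Spec_stitch_preview (center_rec : List (String × String)) (lookup : List (String × List (String × String))) (neighbors : Int) (max_chars : Int) (no_truncate : Bool) (out : String) : Prop := out = stitch_preview_alt center_rec lookup neighbors max_chars no_truncate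
instance (center_rec : List (String × String)) (lookup : List (String × List (String × String))) (neighbors : Int) (max_chars : Int) (no_truncate : Bool) (out : String) : Decidable (Spec_stitch_preview center_rec lookup neighbors max_chars no_truncate out) := by unfold Spec_stitch_preview; infer_instance

-- ===== CLAIM (what is proved, stated in full; the proofs are below) =====
def Claim_equal_stitch_preview : Prop := ∀ (center_rec : List (String × String)) (lookup : List (String × List (String × String))) (neighbors : Int) (max_chars : Int) (no_truncate : Bool), Dom_stitch_preview center_rec lookup neighbors max_chars no_truncate → Pre_stitch_preview center_rec lookup neighbors max_chars no_truncate → Spec_stitch_preview center_rec lookup neighbors max_chars no_truncate (stitch_preview center_rec lookup neighbors max_chars no_truncate)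

-- ===== LEMMAS AND PROOFS =====

-- A's budgeted collection, extracted: what A's loop keeps of a list of texts under budget r.
def pvTakeB : List String → Int → List String
  | [], _ => []
  | t :: ts, r =>
    if r ≤ 0 then []
    else if PySem.Str.len t ≤ r then t :: pvTakeB ts (r - PySem.Str.len t)
    else [PySem.Str.slice t none (some r)]

-- the same collection on char lists with a Nat budget
def pvTakeC : List (List Char) → Nat → List (List Char)
  | [], _ => []
  | t :: ts, n =>
    if n = 0 then []
    else if t.length ≤ n then t :: pvTakeC ts (n - t.length)
    else [t.take n]

def pvJoinTail (ts : List (List Char)) : List Char := ts.flatMap (fun u => ' ' :: u)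

theorem pvJoinTail_cons (t : List Char) (ts : List (List Char)) :
    pvJoinTail (t :: ts) = (' ' :: t) ++ pvJoinTail ts := by
  simp [pvJoinTail]

theorem pvTake_append {α : Type} (l₁ l₂ : List α) (n : Nat) :
    (l₁ ++ l₂).take n = l₁.take n ++ l₂.take (n - l₁.length) := by
  induction l₁ generalizing n with
  | nil => simp
  | cons a l ih =>
    cases n with
    | zero => simp
    | succ m => simp [ih, Nat.succ_sub_succ]

theorem pvChunkText?_none (lookup : PySem.Dict String (List (String × String))) (cdoc nid : String)
    (h : PySem.Dict.get? lookup nid = none) : pvChunkText? lookup cdoc nid = none := by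
  simp [pvChunkText?, h]

theorem pvChunkText?_skip (lookup : PySem.Dict String (List (String × String))) (cdoc nid : String)
    (r : List (String × String)) (h : PySem.Dict.get? lookup nid = some r)
    (hc : ¬ (r ≠ [] ∧ pvDocIdOr ⟨r⟩ nid = cdoc)) : pvChunkText? lookup cdoc nid = none := by
  simp only [pvChunkText?, h]
  rw [if_neg hc]

theorem pvChunkText?_empty (lookup : PySem.Dict String (List (String × String))) (cdoc nid : String)
    (r : List (String × String)) (h : PySem.Dict.get? lookup nid = some r)
    (hc : r ≠ [] ∧ pvDocIdOr ⟨r⟩ nid = cdoc) (ht : pvText ⟨r⟩ = "") :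
    pvChunkText? lookup cdoc nid = none := by
  simp only [pvChunkText?, h]
  rw [if_pos hc, if_neg (by simpa using ht)]

theorem pvChunkText?_some (lookup : PySem.Dict String (List (String × String))) (cdoc nid : String)
    (r : List (String × String)) (h : PySem.Dict.get? lookup nid = some r)
    (hc : r ≠ [] ∧ pvDocIdOr ⟨r⟩ nid = cdoc) (ht : ¬ pvText ⟨r⟩ = "") :
    pvChunkText? lookup cdoc nid = some (pvText ⟨r⟩) := by
  simp only [pvChunkText?, h]
  rw [if_pos hc, if_pos ht]

theorem pvLoopA_true (lookup : PySem.Dict String (List (String × String))) (cdoc : String)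
    (mc : Int) (ids : List String) : ∀ parts total,
    pvLoopA lookup cdoc true mc ids parts total
      = parts ++ ids.filterMap (pvChunkText? lookup cdoc) := by
  induction ids with
  | nil => intro parts total; simp [pvLoopA]
  | cons nid rest ih =>
    intro parts total
    rw [List.filterMap_cons]
    cases h : PySem.Dict.get? lookup nid with
    | none =>
      rw [pvChunkText?_none lookup cdoc nid h]
      simp only [pvLoopA, h]
      exact ih parts total
    | some r =>
      by_cases hc : r ≠ [] ∧ pvDocIdOr ⟨r⟩ nid = cdoc
      · by_cases ht : pvText ⟨r⟩ = ""
        · rw [pvChunkText?_empty lookup cdoc nid r h hc ht]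
          simp only [pvLoopA, h]
          rw [if_pos hc, if_pos ht]
          exact ih parts total
        · rw [pvChunkText?_some lookup cdoc nid r h hc ht]
          simp only [pvLoopA, h]
          rw [if_pos hc, if_neg ht]
          simp only [if_true]
          rw [ih (parts ++ [pvText ⟨r⟩]) total]
          simp
      · rw [pvChunkText?_skip lookup cdoc nid r h hc]
        simp only [pvLoopA, h]
        rw [if_neg hc]
        exact ih parts total

theorem pvLoopA_false (lookup : PySem.Dict String (List (String × String))) (cdoc : String)
    (mc : Int) (ids : List String) : ∀ parts total,
    pvLoopA lookup cdoc false mc ids parts total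
      = parts ++ pvTakeB (ids.filterMap (pvChunkText? lookup cdoc)) (mc - total) := by
  induction ids with
  | nil => intro parts total; simp [pvLoopA, pvTakeB]
  | cons nid rest ih =>
    intro parts total
    rw [List.filterMap_cons]
    cases h : PySem.Dict.get? lookup nid with
    | none =>
      rw [pvChunkText?_none lookup cdoc nid h]
      simp only [pvLoopA, h]
      exact ih parts total
    | some r =>
      by_cases hc : r ≠ [] ∧ pvDocIdOr ⟨r⟩ nid = cdoc
      · by_cases ht : pvText ⟨r⟩ = ""
        · rw [pvChunkText?_empty lookup cdoc nid r h hc ht]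
          simp only [pvLoopA, h]
          rw [if_pos hc, if_pos ht]
          exact ih parts total
        · rw [pvChunkText?_some lookup cdoc nid r h hc ht]
          simp only [pvLoopA, h, pvTakeB]
          rw [if_pos hc, if_neg ht]
          simp only [Bool.false_eq_true, if_false]
          by_cases hr : mc - total ≤ 0
          · simp only [if_pos hr]
            simp
          · simp only [if_neg hr]
            by_cases hl : PySem.Str.len (pvText ⟨r⟩) ≤ mc - total
            · simp only [if_pos hl]
              rw [ih (parts ++ [pvText ⟨r⟩]) (total + PySem.Str.len (pvText ⟨r⟩))]
              have harith : mc - (total + PySem.Str.len (pvText ⟨r⟩))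
                  = (mc - total) - PySem.Str.len (pvText ⟨r⟩) := by ring
              rw [harith]
              simp
            · simp only [if_neg hl]
      · rw [pvChunkText?_skip lookup cdoc nid r h hc]
        simp only [pvLoopA, h]
        rw [if_neg hc]
        exact ih parts total

theorem pvTakeB_toList (ts : List String) : ∀ (r : Int), 0 ≤ r →
    (pvTakeB ts r).map String.toList = pvTakeC (ts.map String.toList) r.toNat := by
  induction ts with
  | nil => intro r h; simp [pvTakeB, pvTakeC]
  | cons t ts ih =>
    intro r h
    have hlen : PySem.Str.len t = (t.toList.length : Int) := by simp [PySem.Str.len_eq]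
    by_cases h0 : r ≤ 0
    · have hr0 : r = 0 := le_antisymm h0 h
      subst hr0
      simp [pvTakeB, pvTakeC]
    · have hn0 : ¬ r.toNat = 0 := by omega
      by_cases hl : PySem.Str.len t ≤ r
      · have hl' : t.toList.length ≤ r.toNat := by omega
        have hsub : (r - PySem.Str.len t).toNat = r.toNat - t.toList.length := by omega
        simp only [pvTakeB, pvTakeC, List.map_cons, if_neg h0, if_pos hl, if_neg hn0, if_pos hl']
        rw [ih _ (by omega), hsub]
      · have hl' : ¬ t.toList.length ≤ r.toNat := by omega
        simp only [pvTakeB, pvTakeC, List.map_cons, List.map_nil, if_neg h0, if_neg hl,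
          if_neg hn0, if_neg hl']
        congr 1
        rw [PySem.Str.toList_slice, PySem.Chars.slice_eq_listSlice, PySem.List.slice_to t.toList h]

theorem pvJoin_cons (t : List Char) (ts : List (List Char)) :
    PySem.Chars.join [' '] (t :: ts) = t ++ pvJoinTail ts := by
  induction ts generalizing t with
  | nil => simp [PySem.Chars.join_singleton, pvJoinTail]
  | cons q rest ih =>
    rw [PySem.Chars.join_cons_cons, ih q]
    simp [pvJoinTail, List.flatMap_cons]

theorem pvTakeC_tail_take (ts : List (List Char)) : ∀ (n : Nat),
    (pvJoinTail (pvTakeC ts n)).take n = (pvJoinTail ts).take n := by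
  induction ts with
  | nil => intro n; simp [pvTakeC]
  | cons t ts ih =>
    intro n
    by_cases h0 : n = 0
    · simp [h0]
    · simp only [pvTakeC, if_neg h0]
      by_cases hl : t.length ≤ n
      · rw [if_pos hl, pvJoinTail_cons, pvJoinTail_cons, pvTake_append, pvTake_append]
        congr 1
        simp only [List.length_cons]
        have e1 : n - (t.length + 1) = n - t.length - 1 := by omega
        rw [e1]
        have key := ih (n - t.length)
        have t1 : (pvJoinTail (pvTakeC ts (n - t.length))).take (n - t.length - 1)
            = ((pvJoinTail (pvTakeC ts (n - t.length))).take (n - t.length)).take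
                (n - t.length - 1) := by
          rw [List.take_take, Nat.min_eq_left (by omega)]
        rw [t1, key, List.take_take, Nat.min_eq_left (by omega)]
      · rw [if_neg hl]
        have hsing : pvJoinTail [t.take n] = ' ' :: t.take n := by simp [pvJoinTail]
        rw [hsing, pvJoinTail_cons, pvTake_append]
        simp only [List.length_cons]
        have e1 : n - (t.length + 1) = 0 := by omega
        rw [e1, List.take_zero, List.append_nil]
        cases n with
        | zero => omega
        | succ m =>
          simp only [List.take_succ_cons, List.take_take, Nat.min_eq_left (Nat.le_succ m)]

theorem pvTakeC_join_take (ts : List (List Char)) (n : Nat) :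
    (PySem.Chars.join [' '] (pvTakeC ts n)).take n = (PySem.Chars.join [' '] ts).take n := by
  cases ts with
  | nil => simp [pvTakeC]
  | cons t ts =>
    by_cases h0 : n = 0
    · simp [h0]
    · simp only [pvTakeC, if_neg h0]
      by_cases hl : t.length ≤ n
      · rw [if_pos hl, pvJoin_cons, pvJoin_cons, pvTake_append, pvTake_append]
        congr 1
        exact pvTakeC_tail_take ts (n - t.length)
      · rw [if_neg hl, PySem.Chars.join_singleton, pvJoin_cons, pvTake_append]
        have e1 : n - t.length = 0 := by omega
        rw [e1, List.take_zero, List.append_nil, List.take_take, Nat.min_self]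

theorem pvTakeB_join_slice (ts : List String) (mc : Int) (h : 0 ≤ mc) :
    PySem.Str.slice (PySem.Str.join " " (pvTakeB ts mc)) none (some mc)
      = PySem.Str.slice (PySem.Str.join " " ts) none (some mc) := by
  rw [← String.toList_inj]
  simp only [PySem.Str.toList_slice, PySem.Chars.slice_eq_listSlice, PySem.Str.toList_join]
  rw [PySem.List.slice_to _ h, PySem.List.slice_to _ h]
  have hsep : (" " : String).toList = [' '] := by decide
  rw [hsep, pvTakeB_toList ts mc h, pvTakeC_join_take]

theorem pvTakeB_ne_nil (t : String) (ts : List String) (r : Int) (h : 0 < r) :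
    pvTakeB (t :: ts) r ≠ [] := by
  simp only [pvTakeB, if_neg (by omega : ¬ r ≤ 0)]
  split_ifs <;> simp

theorem pvSlice_zero (s : String) : PySem.Str.slice s none (some 0) = "" := by
  rw [← String.toList_inj]
  simp only [PySem.Str.toList_slice, PySem.Chars.slice_eq_listSlice]
  rw [PySem.List.slice_to _ (le_refl (0 : Int))]
  simp

-- ===== VERDICT (by name: the statement is the Claim_ definition above) =====
theorem stitch_preview_spec : Claim_equal_stitch_preview := by
  intro center_rec lookup neighbors max_chars no_truncate _ hPre
  unfold Pre_stitch_preview at hPre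
  unfold Spec_stitch_preview
  simp only [stitch_preview, stitch_preview_alt]
  cases no_truncate with
  | true =>
    rw [pvLoopA_true]
    simp only [List.nil_append, List.isEmpty_iff]
    by_cases hnil : (pvNeighborIds (PySem.Dict.getD ⟨center_rec⟩ "id" "") neighbors).filterMap
        (pvChunkText? ⟨lookup⟩ (pvDocIdOr ⟨center_rec⟩ (PySem.Dict.getD ⟨center_rec⟩ "id" ""))) = []
    · simp [hnil]
    · simp [hnil]
  | false =>
    have hmc : 0 ≤ max_chars := by
      rcases hPre with h | h
      · simp at h
      · exact h
    rw [pvLoopA_false]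
    simp only [List.nil_append, List.isEmpty_iff, sub_zero]
    cases htexts : (pvNeighborIds (PySem.Dict.getD ⟨center_rec⟩ "id" "") neighbors).filterMap
        (pvChunkText? ⟨lookup⟩ (pvDocIdOr ⟨center_rec⟩ (PySem.Dict.getD ⟨center_rec⟩ "id" ""))) with
    | nil => simp [pvTakeB]
    | cons t ts =>
      simp only [if_neg (by simp : ¬ (false = true))]
      rcases eq_or_lt_of_le hmc with h0 | hpos
      · rw [← h0, pvSlice_zero, pvSlice_zero]
      · have hne := pvTakeB_ne_nil t ts max_chars hpos
        rw [if_pos hne, if_neg (by simp : ¬ (t :: ts = ([] : List String)))]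
        exact pvTakeB_join_slice (t :: ts) max_chars hmc
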